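-- pv_equiv track=rewrite | github.com/aidsuu/penq-pennylane | lattice_geometry_utils.py | square_horizontal_pairs
-- ===== SOURCE A (Python) =====
-- def square_site_index(Lx, x, y):
--     if Lx < 1:
--         raise ValueError("Lx must be positive.")
--     if x < 0 or y < 0 or x >= Lx:
--         raise ValueError("square_site_index received out-of-range coordinates.")
--     return int(x + Lx * y)
--
-- def square_horizontal_pairs(Lx, Ly):
--     if Lx < 1 or Ly < 1:
--         raise ValueError("Lx and Ly must be positive integers.")
--     pairs = []
--     for y in range(Ly):
--         for x in range(Lx - 1):
--             left = square_site_index(Lx, x, y)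
--             right = square_site_index(Lx, x + 1, y)
--             pairs.append((left, right))
--     return pairs
-- ===== SOURCE B (Python) =====
-- def square_horizontal_pairs(Lx, Ly):
--     if Lx < 1 or Ly < 1:
--         raise ValueError("Lx and Ly must be positive integers.")
--     pairs = []
--     for i in range(Lx * Ly):
--         if (i + 1) % Lx != 0:
--             pairs.append((i, i + 1))
--     return pairs
-- ===== Notes on version B (the rewrite author's own statement) =====
-- stated objective: simpler
-- what changed: Replaced the nested (y,x) loops with the square_site_index helper by a single pass over the flattened index range(Lx*Ly), emitting (i, i+1) whenever i is not at the right edge ((i+1) % Lx != 0).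
import Mathlib
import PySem

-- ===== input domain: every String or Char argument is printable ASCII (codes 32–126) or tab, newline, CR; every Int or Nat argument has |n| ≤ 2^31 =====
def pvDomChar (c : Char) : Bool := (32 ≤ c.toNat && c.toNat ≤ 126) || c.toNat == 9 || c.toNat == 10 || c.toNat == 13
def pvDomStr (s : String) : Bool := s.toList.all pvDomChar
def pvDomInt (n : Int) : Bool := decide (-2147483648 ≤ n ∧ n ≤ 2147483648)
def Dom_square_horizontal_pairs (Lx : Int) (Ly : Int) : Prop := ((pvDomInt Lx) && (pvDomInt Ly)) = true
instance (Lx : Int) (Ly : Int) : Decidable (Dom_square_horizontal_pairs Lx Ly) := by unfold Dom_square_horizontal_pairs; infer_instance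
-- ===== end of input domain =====

-- B replaces the nested (y,x) loops and the square_site_index helper by one pass over the
-- flattened index range(Lx*Ly), appending (i, i+1) when i is not at a right edge: simpler.
-- Both Pythons raise ValueError when Lx < 1 or Ly < 1; Pre_ excludes exactly those inputs.

-- ===== PORT A =====
-- square_site_index: the two raises become `none` (unreachable from the in-range loop calls).
def square_site_index (Lx : Int) (x : Int) (y : Int) : Option Int :=
  if Lx < 1 then none
  else if x < 0 ∨ y < 0 ∨ x ≥ Lx then none
  else some (x + Lx * y)

def square_horizontal_pairs (Lx : Int) (Ly : Int) : List (Int × Int) :=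
  if Lx < 1 ∨ Ly < 1 then []   -- Python raises ValueError here; excluded by Pre_
  else
    (PySem.List.pyRange 0 Ly).foldl (fun pairs y =>
      (PySem.List.pyRange 0 (Lx - 1)).foldl (fun pairs x =>
        match square_site_index Lx x y, square_site_index Lx (x + 1) y with
        | some left, some right => pairs ++ [(left, right)]
        | _, _ => pairs) pairs) []

-- ===== PORT B =====
def square_horizontal_pairs_alt (Lx : Int) (Ly : Int) : List (Int × Int) :=
  if Lx < 1 ∨ Ly < 1 then []   -- Python raises ValueError here; excluded by Pre_
  else
    (PySem.List.pyRange 0 (Lx * Ly)).foldl (fun pairs i =>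
      if PySem.Int.mod (i + 1) Lx ≠ 0 then pairs ++ [(i, i + 1)] else pairs) []

-- ===== PRECONDITION & SPEC =====
-- Pre_ excludes exactly the inputs where the Python A raises ValueError (Lx < 1 or Ly < 1).
def Pre_square_horizontal_pairs (Lx : Int) (Ly : Int) : Prop := 1 ≤ Lx ∧ 1 ≤ Ly
instance (Lx : Int) (Ly : Int) : Decidable (Pre_square_horizontal_pairs Lx Ly) := by
  unfold Pre_square_horizontal_pairs; infer_instance

def pvWitness_square_horizontal_pairs : Int × Int := (3, 2)

def Spec_square_horizontal_pairs (Lx : Int) (Ly : Int) (out : List (Int × Int)) : Prop :=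
  out = square_horizontal_pairs_alt Lx Ly
instance (Lx : Int) (Ly : Int) (out : List (Int × Int)) :
    Decidable (Spec_square_horizontal_pairs Lx Ly out) := by
  unfold Spec_square_horizontal_pairs; infer_instance

-- ===== CLAIM (what is proved, stated in full; the proofs are below) =====
def Claim_equal_square_horizontal_pairs : Prop :=
  ∀ (Lx : Int) (Ly : Int), Dom_square_horizontal_pairs Lx Ly →
    Pre_square_horizontal_pairs Lx Ly →
    Spec_square_horizontal_pairs Lx Ly (square_horizontal_pairs Lx Ly)

-- ===== LEMMAS AND PROOFS =====

-- A's result, as a flatMap over rows of a map over columns.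
lemma A_eq_flatMap (Lx Ly : Int) (hx : 1 ≤ Lx) (hy : 1 ≤ Ly) :
    square_horizontal_pairs Lx Ly =
      (PySem.List.pyRange 0 Ly).flatMap (fun y =>
        (PySem.List.pyRange 0 (Lx - 1)).map (fun x => (x + Lx * y, x + 1 + Lx * y))) := by
  unfold square_horizontal_pairs
  rw [if_neg (by omega)]
  rw [PySem.List.foldl_congr_mem _ _
      (fun pairs y => pairs ++ (PySem.List.pyRange 0 (Lx - 1)).map
        (fun x => (x + Lx * y, x + 1 + Lx * y))) _ ?_]
  · rw [PySem.List.foldl_append_eq_flatMap]; simp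
  · intro acc y hyMem
    rw [PySem.List.mem_pyRange_one] at hyMem
    rw [PySem.List.foldl_congr_mem _ _
        (fun pairs x => pairs ++ [(x + Lx * y, x + 1 + Lx * y)]) _ ?_]
    · exact PySem.List.foldl_append_singleton_eq_map _ _ _
    · intro acc x hxMem
      rw [PySem.List.mem_pyRange_one] at hxMem
      have h1 : square_site_index Lx x y = some (x + Lx * y) := by
        unfold square_site_index
        rw [if_neg (by omega), if_neg (by omega)]
      have h2 : square_site_index Lx (x + 1) y = some (x + 1 + Lx * y) := by
        unfold square_site_index
        rw [if_neg (by omega), if_neg (by omega)]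
      rw [h1, h2]

-- B's result, as a filter-then-map over the flattened range.
lemma B_eq_filterMap (Lx Ly : Int) (hx : 1 ≤ Lx) (hy : 1 ≤ Ly) :
    square_horizontal_pairs_alt Lx Ly =
      ((PySem.List.pyRange 0 (Lx * Ly)).filter
        (fun i => decide (PySem.Int.mod (i + 1) Lx ≠ 0))).map (fun i => (i, i + 1)) := by
  unfold square_horizontal_pairs_alt
  rw [if_neg (by omega)]
  rw [PySem.List.foldl_congr_mem _ _
      (fun pairs i => if (decide (PySem.Int.mod (i + 1) Lx ≠ 0)) = true
        then pairs ++ [(i, i + 1)] else pairs) _ (by intro acc i _; simp)]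
  rw [PySem.List.foldl_append_if]; simp


lemma filter_row (a : Nat) (ha : 1 ≤ a) :
    (List.range a).filter (fun j : Nat => decide ((j + 1) % a ≠ 0)) = List.range (a - 1) := by
  have h : a - 1 + 1 = a := by omega
  conv_lhs => rw [← h, List.range_succ]
  rw [h, List.filter_append]
  have h1 : (List.range (a - 1)).filter (fun j : Nat => decide ((j + 1) % a ≠ 0)) =
      List.range (a - 1) := by
    apply List.filter_eq_self.mpr
    intro j hj
    rw [List.mem_range] at hj
    simp only [decide_eq_true_eq]
    rw [Nat.mod_eq_of_lt (by omega)]; omega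
  have h2 : ([a - 1] : List Nat).filter (fun j : Nat => decide ((j + 1) % a ≠ 0)) = [] := by
    simp only [List.filter_cons, List.filter_nil]
    rw [if_neg]
    simp only [decide_eq_true_eq, Nat.sub_add_cancel ha, Nat.mod_self]
    omega
  rw [h1, h2, List.append_nil]

lemma key (a b : Nat) (ha : 1 ≤ a) :
    (List.range b).flatMap (fun y : Nat =>
        (List.range (a - 1)).map (fun x : Nat =>
          (((x : Int) + (a : Int) * (y : Int)), ((x : Int) + 1 + (a : Int) * (y : Int))))) =
      ((List.range (a * b)).filter
        (fun i : Nat => decide ((i + 1) % a ≠ 0))).map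
          (fun i : Nat => ((i : Int), (i : Int) + 1)) := by
  induction b with
  | zero => simp
  | succ n ih =>
    have hr : List.range (a * (n + 1)) =
        List.range (a * n) ++ (List.range a).map (fun j => a * n + j) := by
      rw [Nat.mul_succ, List.range_add]
    rw [hr, List.filter_append, List.map_append, ← ih, List.range_succ, List.flatMap_append]
    congr 1
    simp only [List.flatMap_cons, List.flatMap_nil, List.append_nil]
    rw [List.filter_map]
    have hp : ((fun i : Nat => decide ((i + 1) % a ≠ 0)) ∘ fun j => a * n + j) =
        (fun j : Nat => decide ((j + 1) % a ≠ 0)) := by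
      funext j
      simp only [Function.comp]
      congr 1
      rw [Nat.add_assoc, Nat.add_comm (a * n), Nat.mul_comm a n, Nat.add_mul_mod_self_right]
    rw [hp, filter_row a ha, List.map_map]
    apply List.map_congr_left
    intro x _
    simp only [Function.comp, Prod.mk.injEq]
    constructor <;> (push_cast; ring)

-- ===== VERDICT (by name: the statement is the Claim_ definition above) =====
theorem square_horizontal_pairs_spec : Claim_equal_square_horizontal_pairs := by
  intro Lx Ly _ hpre
  obtain ⟨hx, hy⟩ := hpre
  unfold Spec_square_horizontal_pairs
  rw [A_eq_flatMap Lx Ly hx hy, B_eq_filterMap Lx Ly hx hy]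
  obtain ⟨a, rfl⟩ : ∃ a : Nat, Lx = (a : Int) := ⟨Lx.toNat, by omega⟩
  obtain ⟨b, rfl⟩ : ∃ b : Nat, Ly = (b : Int) := ⟨Ly.toNat, by omega⟩
  have ha : 1 ≤ a := by exact_mod_cast hx
  have hab : (a : Int) * (b : Int) = ((a * b : Nat) : Int) := by push_cast; ring
  have ha1 : (a : Int) - 1 = ((a - 1 : Nat) : Int) := by omega
  rw [hab, ha1, PySem.List.pyRange_zero_natCast, PySem.List.pyRange_zero_natCast,
    PySem.List.pyRange_zero_natCast]
  have hpred : ∀ k : Nat,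
      decide (PySem.Int.mod ((k : Int) + 1) (a : Int) ≠ 0) = decide ((k + 1) % a ≠ 0) := by
    intro k
    rw [PySem.Int.mod_eq_emod_of_pos (by exact_mod_cast ha),
      show ((k : Int) + 1) = ((k + 1 : Nat) : Int) from by push_cast; ring, ← Int.natCast_mod]
    simp only [ne_eq, Nat.cast_eq_zero]
  simp only [List.flatMap_map, List.map_map, List.filter_map, Function.comp_def, hpred]
  exact key a b ha
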